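-- pv_equiv track=rewrite | github.com/minocrafft/CodingTest | Programmers/level1/172928.py | solution
-- ===== SOURCE A (Python) =====
-- def solution(park, routes):
--     course = {
--         "E": (0, 1),
--         "W": (0, -1),
--         "S": (1, 0),
--         "N": (-1, 0),
--     }
--
--     row, column = len(park), len(park[0])
--     x, y = (0, 0)
--     for i, p in enumerate(park):
--         if "S" in p:
--             x, y = i, p.index("S")
--             break
--
--     for route in routes:
--         direction, n = route.split()
--         dx, dy = course[direction]
--         n = int(n)
--
--         _x, _y = x, y
--         for _ in range(n):
--             if (
--                 0 <= _x + dx < row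
--                 and 0 <= _y + dy < column
--                 and park[_x + dx][_y + dy] != "X"
--             ):
--                 _x, _y = _x + dx, _y + dy
--             else:
--                 _x, _y = x, y
--                 break
--
--         x, y = _x, _y
--
--     return [x, y]
-- ===== SOURCE B (Python) =====
-- def solution(park, routes):
--     DIRS = {"E": (0, 1), "W": (0, -1), "S": (1, 0), "N": (-1, 0)}
--     rows, cols = len(park), len(park[0])
--
--     def cell(i, j):
--         line = park[i]
--         return line[j] if j < len(line) else "X"  # a cell a short row misses acts as a wall
--
--     def prefix_blocked(cells):
--         acc = [0]
--         for ch in cells: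
--             acc.append(acc[-1] + (ch == "X"))
--         return acc
--
--     rowpre = [prefix_blocked([cell(i, j) for j in range(cols)]) for i in range(rows)]
--     colpre = [prefix_blocked([cell(i, j) for i in range(rows)]) for j in range(cols)]
--
--     x = y = 0
--     for i, line in enumerate(park):
--         j = line.find("S")
--         if j != -1:
--             x, y = i, j
--             break
--
--     for route in routes:
--         d, num = route.split()
--         dx, dy = DIRS[d]
--         n = int(num)
--         if n == 0:
--             continue
--         sx, sy = x + dx, y + dy
--         tx, ty = x + n * dx, y + n * dy
--         if n < 0 or not (0 <= sx < rows and 0 <= tx < rows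
--                          and 0 <= sy < cols and 0 <= ty < cols):
--             continue
--         if dx == 0:
--             blocked = (rowpre[x][ty + 1] - rowpre[x][y + 1] if dy > 0
--                        else rowpre[x][y] - rowpre[x][ty])
--         else:
--             blocked = (colpre[y][tx + 1] - colpre[y][x + 1] if dx > 0
--                        else colpre[y][x] - colpre[y][tx])
--         if blocked == 0:
--             x, y = tx, ty
--     return [x, y]
-- ===== Notes on version B (the rewrite author's own statement) =====
-- stated objective: alternative
-- what changed: B precomputes per-row and per-column prefix-sum tables of 'X' counts once and answers each route with an O(1) bounds check plus one prefix-count difference over the open-to-closed segment, instead of A's cell-by-cell walk with rollback per route.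
import Mathlib
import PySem

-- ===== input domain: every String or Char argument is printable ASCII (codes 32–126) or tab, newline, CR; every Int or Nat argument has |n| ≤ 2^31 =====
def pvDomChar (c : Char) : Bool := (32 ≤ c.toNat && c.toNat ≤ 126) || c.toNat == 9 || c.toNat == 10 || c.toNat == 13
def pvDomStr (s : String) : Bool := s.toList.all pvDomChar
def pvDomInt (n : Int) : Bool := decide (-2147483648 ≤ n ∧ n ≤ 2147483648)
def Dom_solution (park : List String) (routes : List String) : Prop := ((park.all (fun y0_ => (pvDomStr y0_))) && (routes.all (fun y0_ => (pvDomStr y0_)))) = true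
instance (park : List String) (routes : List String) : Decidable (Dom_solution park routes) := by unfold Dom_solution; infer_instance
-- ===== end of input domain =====

-- B replaces A's per-route step-by-step walk (with rollback) by row/column 'X'-prefix-sum tables built once,
-- answering each route with an O(1) bounds check plus one prefix-count difference; equal return values proved on Pre_.

-- ===== PORT A =====
-- A's dict `course` as a lookup (missing key = KeyError in Python: none, outside Pre_)
def pvCourseGet (d : String) : Option (Int × Int) :=
  if d = "E" then some (0, 1)
  else if d = "W" then some (0, -1)
  else if d = "S" then some (1, 0)
  else if d = "N" then some (-1, 0)
  else none

-- park[i][j] != "X", evaluated under A's bounds checks. On a cell a short row of a ragged park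
-- misses Python raises IndexError (walk-dependent, see the Pre_ note); the port blocks there.
def pvCellNotX (park : List String) (i j : Int) : Bool :=
  match PySem.List.pyGet? park i with
  | some line =>
    match PySem.Str.pyGet? line j with
    | some c => c ≠ 'X'
    | none => false
  | none => false

-- the `for _ in range(n)` loop: step while clear, on failure reset to (x, y) and break
def pvStep (park : List String) (row col dx dy x y : Int) : Nat → Int × Int → Int × Int
  | 0, st => st
  | Nat.succ k, st =>
    if 0 ≤ st.1 + dx ∧ st.1 + dx < row ∧ 0 ≤ st.2 + dy ∧ st.2 + dy < col ∧
        pvCellNotX park (st.1 + dx) (st.2 + dy) = true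
    then pvStep park row col dx dy x y k (st.1 + dx, st.2 + dy)
    else (x, y)

-- `for i, p in enumerate(park): if "S" in p: x, y = i, p.index("S"); break`
-- (p.index("S") = PySem.Str.find p "S", exact under the `"S" in p` guard)
def pvFindSA : List String → Nat → Int × Int
  | [], _ => (0, 0)
  | p :: rest, i =>
    if PySem.Str.isIn "S" p then ((i : Int), PySem.Str.find p "S")
    else pvFindSA rest (i + 1)

-- one iteration of `for route in routes` (a route Python cannot parse raises: outside Pre_)
def pvRouteA (park : List String) (row col : Int) (st : Int × Int) (route : String) : Int × Int :=
  match PySem.Str.split₀ route with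
  | [d, ns] =>
    match pvCourseGet d, PySem.Int.ofStr? ns with
    | some dxy, some n => pvStep park row col dxy.1 dxy.2 st.1 st.2 n.toNat st
    | _, _ => st
  | _ => st

def solution (park : List String) (routes : List String) : List Int :=
  let row : Int := park.length
  let col : Int := PySem.Str.len (park.headD "")   -- len(park[0]); park = [] raises IndexError: outside Pre_
  let st := routes.foldl (pvRouteA park row col) (pvFindSA park 0)
  [st.1, st.2]

-- ===== PORT B =====
def pvDirsGet (d : String) : Option (Int × Int) :=
  if d = "E" then some (0, 1)
  else if d = "W" then some (0, -1)
  else if d = "S" then some (1, 0)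
  else if d = "N" then some (-1, 0)
  else none

-- cell(i, j): a cell a short row misses acts as a wall
def pvCellB (park : List String) (i j : Int) : Char :=
  match PySem.List.pyGet? park i with
  | some line =>
    match PySem.Str.pyGet? line j with
    | some c => c
    | none => 'X'
  | none => 'X'

-- prefix_blocked: acc starts [0], append acc[-1] + (ch == "X") for each cell
def pvPrefixX (cs : List Char) : List Int :=
  cs.foldl (fun acc ch => acc ++ [acc.getLastD 0 + (if ch = 'X' then 1 else 0)]) [0]

-- [cell(i, j) for j in range(cols)]
def pvRowCells (park : List String) (cols i : Int) : List Char :=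
  (PySem.List.pyRange 0 cols 1).map (fun j => pvCellB park i j)

-- [cell(i, j) for i in range(rows)]
def pvColCells (park : List String) (rows j : Int) : List Char :=
  (PySem.List.pyRange 0 rows 1).map (fun i => pvCellB park i j)

-- table[i][j]; indices produced by B are in range wherever B queries
def pvAt2 (t : List (List Int)) (i j : Int) : Int :=
  (PySem.List.pyGet? ((PySem.List.pyGet? t i).getD []) j).getD 0

-- `j = line.find("S"); if j != -1: x, y = i, j; break`
def pvFindSB : List String → Nat → Int × Int
  | [], _ => (0, 0)
  | line :: rest, i =>
    let j := PySem.Str.find line "S"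
    if j ≠ -1 then ((i : Int), j) else pvFindSB rest (i + 1)

def pvRouteB (rows cols : Int) (rowpre colpre : List (List Int)) (st : Int × Int) (route : String) :
    Int × Int :=
  match PySem.Str.split₀ route with
  | [d, ns] =>
    match pvDirsGet d, PySem.Int.ofStr? ns with
    | some dxy, some n =>
      if n = 0 then st
      else
        let sx := st.1 + dxy.1
        let sy := st.2 + dxy.2
        let tx := st.1 + n * dxy.1
        let ty := st.2 + n * dxy.2
        if n < 0 ∨ ¬(0 ≤ sx ∧ sx < rows ∧ 0 ≤ tx ∧ tx < rows ∧
            0 ≤ sy ∧ sy < cols ∧ 0 ≤ ty ∧ ty < cols) then st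
        else
          let blocked : Int :=
            if dxy.1 = 0 then
              if dxy.2 > 0 then pvAt2 rowpre st.1 (ty + 1) - pvAt2 rowpre st.1 (st.2 + 1)
              else pvAt2 rowpre st.1 st.2 - pvAt2 rowpre st.1 ty
            else
              if dxy.1 > 0 then pvAt2 colpre st.2 (tx + 1) - pvAt2 colpre st.2 (st.1 + 1)
              else pvAt2 colpre st.2 st.1 - pvAt2 colpre st.2 tx
          if blocked = 0 then (tx, ty) else st
    | _, _ => st
  | _ => st

def solution_alt (park : List String) (routes : List String) : List Int :=
  let rows : Int := park.length
  let cols : Int := PySem.Str.len (park.headD "")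
  let rowpre := (PySem.List.pyRange 0 rows 1).map (fun i => pvPrefixX (pvRowCells park cols i))
  let colpre := (PySem.List.pyRange 0 cols 1).map (fun j => pvPrefixX (pvColCells park rows j))
  let st := routes.foldl (pvRouteB rows cols rowpre colpre) (pvFindSB park 0)
  [st.1, st.2]

-- ===== PRECONDITION & SPEC =====
-- a route parses as "D n", D ∈ {E,W,S,N}, n an int literal
def pvRouteOK (route : String) : Bool :=
  match PySem.Str.split₀ route with
  | [d, ns] => (d == "E" || d == "W" || d == "S" || d == "N") && (PySem.Int.ofStr? ns).isSome
  | _ => false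

-- Pre_ = park nonempty (an empty park raises IndexError at len(park[0])) and every route parsable
-- (else ValueError/KeyError). On a ragged park A raises IndexError only when the walk actually steps
-- onto a cell a short row misses — a walk-dependent set with no closed form, so those inputs stay
-- inside Pre_; both ports treat such a cell as blocking, and wherever A returns it never read one.
def Pre_solution (park : List String) (routes : List String) : Prop :=
  park ≠ [] ∧ (∀ r ∈ routes, pvRouteOK r = true)
instance (park : List String) (routes : List String) : Decidable (Pre_solution park routes) := by
  unfold Pre_solution; infer_instance

def pvWitness_solution : List String × List String := (["S."], ["E 1"])

def Spec_solution (park : List String) (routes : List String) (out : List Int) : Prop := out = solution_alt park routes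
instance (park : List String) (routes : List String) (out : List Int) : Decidable (Spec_solution park routes out) := by unfold Spec_solution; infer_instance

-- ===== CLAIM (what is proved, stated in full; the proofs are below) =====
def Claim_equal_solution : Prop := ∀ (park : List String) (routes : List String), Dom_solution park routes → Pre_solution park routes → Spec_solution park routes (solution park routes)

-- ===== LEMMAS AND PROOFS =====

-- The two S-searches agree ("S" in p ↔ p.find("S") ≠ -1; both then return find's index).
theorem pvFindS_eq (l : List String) (i : Nat) : pvFindSA l i = pvFindSB l i := by
  induction l generalizing i with
  | nil => rfl
  | cons p rest ih =>
    simp only [pvFindSA, pvFindSB]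
    by_cases h : ("S".toList <:+: p.toList)
    · rw [if_pos ((PySem.Str.isIn_iff_infix _ _).2 h),
        if_pos ((PySem.Str.find_ne_neg_one_iff _ _).2 h)]
    · rw [if_neg (fun hc => h ((PySem.Str.isIn_iff_infix _ _).1 hc)),
        if_neg (fun hc => h ((PySem.Str.find_ne_neg_one_iff _ _).1 hc)), ih]

-- the S-search yields nonnegative coordinates
theorem pvFindS_nonneg (l : List String) (i : Nat) :
    ∃ xn yn : Nat, pvFindSA l i = ((xn : Int), (yn : Int)) := by
  induction l generalizing i with
  | nil => exact ⟨0, 0, rfl⟩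
  | cons p rest ih =>
    simp only [pvFindSA]
    by_cases h : PySem.Str.isIn "S" p = true
    · rw [if_pos h]
      have h0 : 0 ≤ PySem.Str.find p "S" :=
        (PySem.Str.find_nonneg_iff _ _).2 ((PySem.Str.isIn_iff_infix _ _).1 h)
      exact ⟨i, (PySem.Str.find p "S").toNat, by rw [Int.toNat_of_nonneg h0]⟩
    · rw [if_neg h]; exact ih _

-- Bool "steps i+1 .. i+m are all ok" used to characterize A's inner loop
def pvAllOk (f : Int → Bool) : Int → Nat → Bool
  | _, 0 => true
  | i, Nat.succ k => f (i + 1) && pvAllOk f (i + 1) k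

theorem pvAllOk_iff (f : Int → Bool) (i : Int) (m : Nat) :
    pvAllOk f i m = true ↔ ∀ j : Nat, j < m → f (i + 1 + (j : Int)) = true := by
  induction m generalizing i with
  | zero => simp [pvAllOk]
  | succ k ih =>
    simp only [pvAllOk, Bool.and_eq_true, ih]
    constructor
    · rintro ⟨h1, h2⟩ j hj
      match j, hj with
      | 0, _ => simpa using h1
      | (j' + 1), hj =>
        have := h2 j' (by omega)
        convert this using 2
        push_cast; ring
    · intro h
      refine ⟨by simpa using h 0 (by omega), fun j hj => ?_⟩
      have := h (j + 1) (by omega)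
      convert this using 2
      push_cast; ring

-- the condition A tests before step k (counted from the route's start (x, y))
def pvOkA (park : List String) (row col dx dy x y k : Int) : Bool :=
  decide (0 ≤ x + k * dx) && decide (x + k * dx < row) && decide (0 ≤ y + k * dy) &&
    decide (y + k * dy < col) && pvCellNotX park (x + k * dx) (y + k * dy)

-- characterization of A's inner loop
theorem pvStep_char (park : List String) (row col dx dy x y : Int) (m i : Nat) :
    pvStep park row col dx dy x y m (x + (i : Int) * dx, y + (i : Int) * dy) =
      if pvAllOk (pvOkA park row col dx dy x y) (i : Int) m = true
      then (x + ((i : Int) + (m : Int)) * dx, y + ((i : Int) + (m : Int)) * dy)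
      else (x, y) := by
  induction m generalizing i with
  | zero => simp [pvStep, pvAllOk]
  | succ k ih =>
    have harg1 : x + (i : Int) * dx + dx = x + ((i : Int) + 1) * dx := by ring
    have harg2 : y + (i : Int) * dy + dy = y + ((i : Int) + 1) * dy := by ring
    simp only [pvStep, harg1, harg2]
    have hcond : (0 ≤ x + ((i : Int) + 1) * dx ∧ x + ((i : Int) + 1) * dx < row ∧
        0 ≤ y + ((i : Int) + 1) * dy ∧ y + ((i : Int) + 1) * dy < col ∧
        pvCellNotX park (x + ((i : Int) + 1) * dx) (y + ((i : Int) + 1) * dy) = true) ↔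
        pvOkA park row col dx dy x y ((i : Int) + 1) = true := by
      simp [pvOkA, Bool.and_eq_true, and_assoc]
    by_cases hok : pvOkA park row col dx dy x y ((i : Int) + 1) = true
    · rw [if_pos (hcond.2 hok)]
      have hi1 : ((i : Int) + 1) = ((i + 1 : Nat) : Int) := by push_cast; ring
      rw [hi1, ih (i + 1)]
      have : pvAllOk (pvOkA park row col dx dy x y) ((i : Int)) (k + 1) =
          pvAllOk (pvOkA park row col dx dy x y) (((i + 1 : Nat) : Int)) k := by
        simp only [pvAllOk]
        rw [← hi1, hok]
        simp
      rw [this]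
      split_ifs with h
      · congr 2 <;> push_cast <;> ring
      · rfl
    · rw [if_neg (fun hc => hok (hcond.1 hc))]
      have : pvAllOk (pvOkA park row col dx dy x y) ((i : Int)) (k + 1) = false := by
        simp only [pvAllOk]
        rw [Bool.eq_false_iff.2 hok]
        simp
      simp [this]

-- the prefix table of a row is the list of 'X'-counts of its prefixes
theorem pvPrefixX_eq (cs : List Char) :
    pvPrefixX cs =
      (List.range (cs.length + 1)).map (fun j => ((cs.take j).countP (fun c => c == 'X') : Int)) := by
  induction cs using List.reverseRecOn with
  | nil => simp [pvPrefixX]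
  | append_singleton cs c ih =>
    have hsnoc : pvPrefixX (cs ++ [c]) =
        pvPrefixX cs ++ [(pvPrefixX cs).getLastD 0 + (if c = 'X' then 1 else 0)] := by
      simp [pvPrefixX, List.foldl_append]
    have hlast : ((List.range (cs.length + 1)).map
        (fun j => ((cs.take j).countP (fun c => c == 'X') : Int))).getLastD 0 =
        ((cs.countP (fun c => c == 'X') : Int)) := by
      rw [List.range_succ, List.map_append, List.map_singleton, List.getLastD_concat]
      simp
    rw [hsnoc, ih, hlast]
    rw [List.length_append, List.length_singleton]
    conv_rhs => rw [List.range_succ, List.map_append, List.map_singleton]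
    congr 1
    · apply List.map_congr_left
      intro j hj
      rw [List.mem_range] at hj
      rw [List.take_append_of_le_length (by omega)]
    · rw [List.take_of_length_le (by simp)]
      rw [List.countP_append]
      simp only [List.countP_singleton]
      congr 1
      push_cast
      by_cases h : c = 'X' <;> simp [h]

theorem pvPrefixX_get (cs : List Char) (j : Nat) (hj : j ≤ cs.length) :
    PySem.List.pyGet? (pvPrefixX cs) (j : Int) =
      some ((cs.take j).countP (fun c => c == 'X') : Int) := by
  rw [pvPrefixX_eq, PySem.List.pyGet?_natCast, List.getElem?_map, List.getElem?_range (by omega)]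
  rfl

-- a prefix-count difference is zero iff the segment carries no 'X'
theorem pvSeg_iff (cs : List Char) (a m : Nat) (h : a + m ≤ cs.length) :
    (((cs.take (a + m)).countP (fun c => c == 'X') : Int) -
        ((cs.take a).countP (fun c => c == 'X') : Int) = 0 ↔
      ∀ t : Nat, a ≤ t → t < a + m → cs.getD t ' ' ≠ 'X') := by
  have key : (((cs.drop a).take m).countP (fun c => c == 'X') = 0) ↔
      ∀ t : Nat, a ≤ t → t < a + m → cs.getD t ' ' ≠ 'X' := by
    rw [List.countP_eq_zero]
    constructor
    · intro hall t h1 h2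
      have ht : t < cs.length := by omega
      rw [List.getD_eq_getElem cs ' ' ht]
      have hmem : cs[t] ∈ (cs.drop a).take m := by
        rw [List.mem_iff_getElem]
        refine ⟨t - a, by simp; omega, ?_⟩
        rw [List.getElem_take, List.getElem_drop]
        congr 1
        omega
      simpa using hall _ hmem
    · intro hall c hc
      rw [List.mem_iff_getElem] at hc
      obtain ⟨j, hjlt, rfl⟩ := hc
      have hjm : j < m := by simp at hjlt; omega
      have hlen : a + j < cs.length := by omega
      have := hall (a + j) (by omega) (by omega)
      rw [List.getD_eq_getElem cs ' ' hlen] at this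
      simp only [List.getElem_take, List.getElem_drop]
      simpa using this
  rw [List.take_add, List.countP_append]
  push_cast
  constructor
  · intro h0
    exact key.1 (by omega)
  · intro hall
    have := key.2 hall
    omega

-- A's step test agrees with B's wall-padded cell everywhere (both block a missing cell)
theorem pvCellNotX_iffB (park : List String) (i j : Int) :
    pvCellNotX park i j = true ↔ pvCellB park i j ≠ 'X' := by
  unfold pvCellNotX pvCellB
  cases hp : PySem.List.pyGet? park i with
  | none => simp
  | some line =>
    show (match PySem.Str.pyGet? line j with
          | some c => (decide (c ≠ 'X') : Bool)
          | none => false) = true ↔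
        (match PySem.Str.pyGet? line j with
          | some c => c
          | none => 'X') ≠ 'X'
    cases hcj : PySem.Str.pyGet? line j <;> simp only [hcj] <;> simp

-- Nat-index views of the cell lists B builds
def pvRowChars (park : List String) (L x : Nat) : List Char :=
  (List.range L).map (fun (j : Nat) => pvCellB park (x : Int) (j : Int))

def pvColChars (park : List String) (R y : Nat) : List Char :=
  (List.range R).map (fun (i : Nat) => pvCellB park (i : Int) (y : Int))

theorem pvRowCells_eq (park : List String) (L x : Nat) :
    pvRowCells park (L : Int) (x : Int) = pvRowChars park L x := by
  unfold pvRowCells pvRowChars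
  rw [PySem.List.pyRange_zero_natCast, List.map_map]
  rfl

theorem pvColCells_eq (park : List String) (R y : Nat) :
    pvColCells park (R : Int) (y : Int) = pvColChars park R y := by
  unfold pvColCells pvColChars
  rw [PySem.List.pyRange_zero_natCast, List.map_map]
  rfl

theorem pvRowChars_length (park : List String) (L x : Nat) :
    (pvRowChars park L x).length = L := by simp [pvRowChars]

theorem pvColChars_length (park : List String) (R y : Nat) :
    (pvColChars park R y).length = R := by simp [pvColChars]

theorem pvRowChars_getD (park : List String) (L x t : Nat) (ht : t < L) :
    (pvRowChars park L x).getD t ' ' = pvCellB park (x : Int) (t : Int) := by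
  simp [pvRowChars, List.getD_eq_getElem?_getD, List.getElem?_map, List.getElem?_range ht]

theorem pvColChars_getD (park : List String) (R y t : Nat) (ht : t < R) :
    (pvColChars park R y).getD t ' ' = pvCellB park (t : Int) (y : Int) := by
  simp [pvColChars, List.getD_eq_getElem?_getD, List.getElem?_map, List.getElem?_range ht]

theorem pvAt2_row (park : List String) (L x j : Nat) (hx : x < park.length) (hj : j ≤ L) :
    pvAt2 ((PySem.List.pyRange 0 (park.length : Int) 1).map
        (fun i => pvPrefixX (pvRowCells park (L : Int) i))) (x : Int) (j : Int) =
      (((pvRowChars park L x).take j).countP (fun c => c == 'X') : Int) := by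
  have h1 : ((PySem.List.pyRange 0 (park.length : Int) 1).map
      (fun i => pvPrefixX (pvRowCells park (L : Int) i)))[x]? =
      some (pvPrefixX (pvRowChars park L x)) := by
    rw [PySem.List.pyRange_zero_natCast, List.map_map, List.getElem?_map,
      List.getElem?_range hx]
    simp [pvRowCells_eq]
  have h2 : (pvPrefixX (pvRowChars park L x))[j]? =
      some (((pvRowChars park L x).take j).countP (fun c => c == 'X') : Int) := by
    rw [← PySem.List.pyGet?_natCast]
    exact pvPrefixX_get _ _ (by rw [pvRowChars_length]; exact hj)
  simp only [pvAt2, PySem.List.pyGet?_natCast, h1, Option.getD_some, h2]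

theorem pvAt2_col (park : List String) (L y j : Nat) (hy : y < L) (hj : j ≤ park.length) :
    pvAt2 ((PySem.List.pyRange 0 (L : Int) 1).map
        (fun k => pvPrefixX (pvColCells park (park.length : Int) k))) (y : Int) (j : Int) =
      (((pvColChars park park.length y).take j).countP (fun c => c == 'X') : Int) := by
  have h1 : ((PySem.List.pyRange 0 (L : Int) 1).map
      (fun k => pvPrefixX (pvColCells park (park.length : Int) k)))[y]? =
      some (pvPrefixX (pvColChars park park.length y)) := by
    rw [PySem.List.pyRange_zero_natCast, List.map_map, List.getElem?_map,
      List.getElem?_range hy]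
    simp [pvColCells_eq]
  have h2 : (pvPrefixX (pvColChars park park.length y))[j]? =
      some (((pvColChars park park.length y).take j).countP (fun c => c == 'X') : Int) := by
    rw [← PySem.List.pyGet?_natCast]
    exact pvPrefixX_get _ _ (by rw [pvColChars_length]; exact hj)
  simp only [pvAt2, PySem.List.pyGet?_natCast, h1, Option.getD_some, h2]

theorem pvForall_up (P : Nat → Prop) (a m : Nat) :
    (∀ j : Nat, j < m → P (a + 1 + j)) ↔ (∀ t : Nat, a + 1 ≤ t → t < a + 1 + m → P t) := by
  constructor
  · intro h t h1 h2
    have := h (t - (a + 1)) (by omega)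
    rwa [show a + 1 + (t - (a + 1)) = t from by omega] at this
  · intro h j hj
    exact h _ (by omega) (by omega)

theorem pvForall_down (P : Nat → Prop) (y m : Nat) (hm : m ≤ y) :
    (∀ j : Nat, j < m → P (y - (j + 1))) ↔ (∀ t : Nat, y - m ≤ t → t < y → P t) := by
  constructor
  · intro h t h1 h2
    have := h (y - t - 1) (by omega)
    rwa [show y - (y - t - 1 + 1) = t from by omega] at this
  · intro h j hj
    exact h _ (by omega) (by omega)

-- one route: A's stepwise walk equals B's prefix-table query, from any nonnegative position
theorem pvRoute_eq (park : List String) (route : String) (L : Nat) (x y : Nat) :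
    pvRouteA park (park.length : Int) (L : Int) ((x : Int), (y : Int)) route =
      pvRouteB (park.length : Int) (L : Int)
        ((PySem.List.pyRange 0 (park.length : Int) 1).map
          (fun i => pvPrefixX (pvRowCells park (L : Int) i)))
        ((PySem.List.pyRange 0 (L : Int) 1).map
          (fun k => pvPrefixX (pvColCells park (park.length : Int) k)))
        ((x : Int), (y : Int)) route := by
  rcases hsp : PySem.Str.split₀ route with _ | ⟨d, _ | ⟨ns, _ | ⟨e, tl⟩⟩⟩
  · simp only [pvRouteA, pvRouteB, hsp]
  · simp only [pvRouteA, pvRouteB, hsp]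
  case cons.cons.cons => simp only [pvRouteA, pvRouteB, hsp]
  case cons.cons.nil =>
    rcases hdg : pvDirsGet d with _ | ⟨dx, dy⟩
    · have hcg : pvCourseGet d = none := hdg
      simp only [pvRouteA, pvRouteB, hsp, hdg, hcg]
    rcases hn : PySem.Int.ofStr? ns with _ | n
    · have hcg : pvCourseGet d = some (dx, dy) := hdg
      simp only [pvRouteA, pvRouteB, hsp, hdg, hcg, hn]
    have hcg : pvCourseGet d = some (dx, dy) := hdg
    simp only [pvRouteA, pvRouteB, hsp, hdg, hcg, hn]
    have hdir : (dx = 0 ∧ dy = 1) ∨ (dx = 0 ∧ dy = -1) ∨ (dx = 1 ∧ dy = 0) ∨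
        (dx = -1 ∧ dy = 0) := by
      unfold pvCourseGet at hcg
      split_ifs at hcg <;> simp_all
    by_cases hneg : n < 0
    · have ht0 : n.toNat = 0 := Int.toNat_of_nonpos (le_of_lt hneg)
      rw [ht0, if_neg (by omega : ¬ (n = 0)), if_pos (Or.inl hneg)]
      rfl
    · push_neg at hneg
      obtain ⟨m, rfl⟩ := Int.eq_ofNat_of_zero_le hneg
      rw [Int.toNat_natCast]
      have hnotneg : ¬ ((m : Int) < 0) := by omega
      have hA := pvStep_char park (park.length : Int) (L : Int) dx dy (x : Int) (y : Int) m 0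
      simp only [Nat.cast_zero, zero_mul, add_zero, zero_add] at hA
      rw [hA]
      rcases Nat.eq_zero_or_pos m with rfl | hm
      · rw [if_pos (by omega : ((0 : Nat) : Int) = 0)]
        simp [pvAllOk]
      · rw [if_neg (by omega : ¬ ((m : Int) = 0))]
        rcases hdir with ⟨rfl, rfl⟩ | ⟨rfl, rfl⟩ | ⟨rfl, rfl⟩ | ⟨rfl, rfl⟩
        · -- E : dx = 0, dy = 1
          simp only [mul_zero, mul_one, add_zero,
            eq_true (show (1:Int) > 0 from by norm_num), if_true]
          by_cases hb : (0:Int) ≤ (x : Int) ∧ (x : Int) < (park.length : Int) ∧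
              (0:Int) ≤ (x : Int) ∧ (x : Int) < (park.length : Int) ∧
              (0:Int) ≤ (y : Int) + 1 ∧ (y : Int) + 1 < (L : Int) ∧
              (0:Int) ≤ (y : Int) + (m : Int) ∧ (y : Int) + (m : Int) < (L : Int)
          · have hx : x < park.length := by have := hb.2.1; omega
            have hym : y + m < L := by have := hb.2.2.2.2.2.2.2; omega
            rw [if_neg (not_or.mpr ⟨hnotneg, not_not.mpr hb⟩)]
            have e1 : ((y : Int) + (m : Int) + 1) = ((y + 1 + m : Nat) : Int) := by
              push_cast; ring
            have e2 : ((y : Int) + 1) = ((y + 1 : Nat) : Int) := by push_cast; ring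
            rw [e1, e2, pvAt2_row park L x (y + 1 + m) hx (by omega),
              pvAt2_row park L x (y + 1) hx (by omega)]
            have hseg := pvSeg_iff (pvRowChars park L x) (y + 1) m
              (by rw [pvRowChars_length]; omega)
            have hok_iff : (pvAllOk (pvOkA park (park.length : Int) (L : Int) 0 1
                (x : Int) (y : Int)) 0 m = true) ↔
                ∀ j : Nat, j < m → (pvRowChars park L x).getD (y + 1 + j) ' ' ≠ 'X' := by
              rw [pvAllOk_iff]
              apply forall_congr'
              intro j
              apply imp_congr_right
              intro hj
              unfold pvOkA
              simp only [Bool.and_eq_true, decide_eq_true_eq, mul_zero, add_zero, mul_one,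
                and_assoc]
              have e3 : ((0:Int) + 1 + (j : Int)) = ((1 + j : Nat) : Int) := by push_cast; ring
              have e4 : ((y : Int) + ((1 + j : Nat) : Int)) = ((y + 1 + j : Nat) : Int) := by
                push_cast; ring
              rw [e3, e4, pvRowChars_getD park L x (y + 1 + j) (by omega),
                pvCellNotX_iffB park ((x : Nat) : Int) (((y + 1 + j : Nat) : Nat) : Int)]
              constructor
              · intro hconj
                exact hconj.2.2.2.2
              · intro hcell
                exact ⟨by omega, by omega, by omega, by omega, hcell⟩
            have hiff := hok_iff.trans
              ((pvForall_up (fun t => (pvRowChars park L x).getD t ' ' ≠ 'X') y m).trans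
                hseg.symm)
            exact if_congr hiff rfl rfl
          · rw [if_pos (Or.inr hb)]
            have hfalse : ¬ (pvAllOk (pvOkA park (park.length : Int) (L : Int) 0 1
                (x : Int) (y : Int)) 0 m = true) := by
              intro hok
              have h1 := (pvAllOk_iff _ _ _).1 hok 0 (by omega)
              have h2 := (pvAllOk_iff _ _ _).1 hok (m - 1) (by omega)
              unfold pvOkA at h1 h2
              simp only [Bool.and_eq_true, decide_eq_true_eq, mul_zero, add_zero, mul_one,
                and_assoc] at h1 h2
              obtain ⟨h1a, h1b, h1c, h1d, -⟩ := h1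
              obtain ⟨h2a, h2b, h2c, h2d, -⟩ := h2
              exact hb ⟨by omega, by omega, by omega, by omega, by omega, by omega,
                by omega, by omega⟩
            rw [if_neg hfalse]
        · -- W : dx = 0, dy = -1
          simp only [mul_zero, add_zero, mul_neg_one,
            eq_false (show ¬ ((-1:Int) > 0) from by norm_num), if_true, if_false,
            ← sub_eq_add_neg]
          by_cases hb : (0:Int) ≤ (x : Int) ∧ (x : Int) < (park.length : Int) ∧
              (0:Int) ≤ (x : Int) ∧ (x : Int) < (park.length : Int) ∧
              (0:Int) ≤ (y : Int) - 1 ∧ (y : Int) - 1 < (L : Int) ∧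
              (0:Int) ≤ (y : Int) - (m : Int) ∧ (y : Int) - (m : Int) < (L : Int)
          · have hx : x < park.length := by have := hb.2.1; omega
            have hyle : y ≤ L := by have := hb.2.2.2.2.2.1; omega
            have hmy : m ≤ y := by have := hb.2.2.2.2.2.2.1; omega
            rw [if_neg (not_or.mpr ⟨hnotneg, not_not.mpr hb⟩)]
            have e1 : ((y : Int) - (m : Int)) = ((y - m : Nat) : Int) := by omega
            rw [e1, pvAt2_row park L x y hx (by omega),
              pvAt2_row park L x (y - m) hx (by omega)]
            have hseg := pvSeg_iff (pvRowChars park L x) (y - m) m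
              (by rw [pvRowChars_length]; omega)
            rw [show y - m + m = y from by omega] at hseg
            have hok_iff : (pvAllOk (pvOkA park (park.length : Int) (L : Int) 0 (-1)
                (x : Int) (y : Int)) 0 m = true) ↔
                ∀ j : Nat, j < m → (pvRowChars park L x).getD (y - (j + 1)) ' ' ≠ 'X' := by
              rw [pvAllOk_iff]
              apply forall_congr'
              intro j
              apply imp_congr_right
              intro hj
              unfold pvOkA
              simp only [Bool.and_eq_true, decide_eq_true_eq, mul_zero, add_zero, mul_neg_one,
                ← sub_eq_add_neg, and_assoc]
              have e4 : ((y : Int) - ((0:Int) + 1 + (j : Int))) = ((y - (j + 1) : Nat) : Int) := by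
                omega
              rw [e4, pvRowChars_getD park L x (y - (j + 1)) (by omega),
                pvCellNotX_iffB park ((x : Nat) : Int) (((y - (j + 1) : Nat) : Nat) : Int)]
              constructor
              · intro hconj
                exact hconj.2.2.2.2
              · intro hcell
                exact ⟨by omega, by omega, by omega, by omega, hcell⟩
            have hiff := hok_iff.trans
              ((pvForall_down (fun t => (pvRowChars park L x).getD t ' ' ≠ 'X') y m hmy).trans
                hseg.symm)
            exact if_congr hiff rfl rfl
          · rw [if_pos (Or.inr hb)]
            have hfalse : ¬ (pvAllOk (pvOkA park (park.length : Int) (L : Int) 0 (-1)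
                (x : Int) (y : Int)) 0 m = true) := by
              intro hok
              have h1 := (pvAllOk_iff _ _ _).1 hok 0 (by omega)
              have h2 := (pvAllOk_iff _ _ _).1 hok (m - 1) (by omega)
              unfold pvOkA at h1 h2
              simp only [Bool.and_eq_true, decide_eq_true_eq, mul_zero, add_zero, mul_neg_one,
                ← sub_eq_add_neg, and_assoc] at h1 h2
              obtain ⟨h1a, h1b, h1c, h1d, -⟩ := h1
              obtain ⟨h2a, h2b, h2c, h2d, -⟩ := h2
              exact hb ⟨by omega, by omega, by omega, by omega, by omega, by omega,
                by omega, by omega⟩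
            rw [if_neg hfalse]
        · -- S : dx = 1, dy = 0
          simp only [mul_zero, mul_one, add_zero,
            eq_false (show ¬ ((1:Int) = 0) from by norm_num),
            eq_true (show (1:Int) > 0 from by norm_num), if_true, if_false]
          by_cases hb : (0:Int) ≤ (x : Int) + 1 ∧ (x : Int) + 1 < (park.length : Int) ∧
              (0:Int) ≤ (x : Int) + (m : Int) ∧ (x : Int) + (m : Int) < (park.length : Int) ∧
              (0:Int) ≤ (y : Int) ∧ (y : Int) < (L : Int) ∧
              (0:Int) ≤ (y : Int) ∧ (y : Int) < (L : Int)
          · have hyL : y < L := by have := hb.2.2.2.2.2.1; omega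
            have hxm : x + m < park.length := by have := hb.2.2.2.1; omega
            rw [if_neg (not_or.mpr ⟨hnotneg, not_not.mpr hb⟩)]
            have e1 : ((x : Int) + (m : Int) + 1) = ((x + 1 + m : Nat) : Int) := by
              push_cast; ring
            have e2 : ((x : Int) + 1) = ((x + 1 : Nat) : Int) := by push_cast; ring
            rw [e1, e2, pvAt2_col park L y (x + 1 + m) hyL (by omega),
              pvAt2_col park L y (x + 1) hyL (by omega)]
            have hseg := pvSeg_iff (pvColChars park park.length y) (x + 1) m
              (by rw [pvColChars_length]; omega)
            have hok_iff : (pvAllOk (pvOkA park (park.length : Int) (L : Int) 1 0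
                (x : Int) (y : Int)) 0 m = true) ↔
                ∀ j : Nat, j < m →
                  (pvColChars park park.length y).getD (x + 1 + j) ' ' ≠ 'X' := by
              rw [pvAllOk_iff]
              apply forall_congr'
              intro j
              apply imp_congr_right
              intro hj
              unfold pvOkA
              simp only [Bool.and_eq_true, decide_eq_true_eq, mul_zero, add_zero, mul_one,
                and_assoc]
              have e3 : ((0:Int) + 1 + (j : Int)) = ((1 + j : Nat) : Int) := by push_cast; ring
              have e4 : ((x : Int) + ((1 + j : Nat) : Int)) = ((x + 1 + j : Nat) : Int) := by
                push_cast; ring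
              rw [e3, e4, pvColChars_getD park park.length y (x + 1 + j) (by omega),
                pvCellNotX_iffB park (((x + 1 + j : Nat) : Nat) : Int) ((y : Nat) : Int)]
              constructor
              · intro hconj
                exact hconj.2.2.2.2
              · intro hcell
                exact ⟨by omega, by omega, by omega, by omega, hcell⟩
            have hiff := hok_iff.trans
              ((pvForall_up (fun t => (pvColChars park park.length y).getD t ' ' ≠ 'X') x m).trans
                hseg.symm)
            exact if_congr hiff rfl rfl
          · rw [if_pos (Or.inr hb)]
            have hfalse : ¬ (pvAllOk (pvOkA park (park.length : Int) (L : Int) 1 0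
                (x : Int) (y : Int)) 0 m = true) := by
              intro hok
              have h1 := (pvAllOk_iff _ _ _).1 hok 0 (by omega)
              have h2 := (pvAllOk_iff _ _ _).1 hok (m - 1) (by omega)
              unfold pvOkA at h1 h2
              simp only [Bool.and_eq_true, decide_eq_true_eq, mul_zero, add_zero, mul_one,
                and_assoc] at h1 h2
              obtain ⟨h1a, h1b, h1c, h1d, -⟩ := h1
              obtain ⟨h2a, h2b, h2c, h2d, -⟩ := h2
              exact hb ⟨by omega, by omega, by omega, by omega, by omega, by omega,
                by omega, by omega⟩
            rw [if_neg hfalse]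
        · -- N : dx = -1, dy = 0
          simp only [mul_zero, add_zero, mul_neg_one,
            eq_false (show ¬ ((-1:Int) = 0) from by norm_num),
            eq_false (show ¬ ((-1:Int) > 0) from by norm_num), if_false,
            ← sub_eq_add_neg]
          by_cases hb : (0:Int) ≤ (x : Int) - 1 ∧ (x : Int) - 1 < (park.length : Int) ∧
              (0:Int) ≤ (x : Int) - (m : Int) ∧ (x : Int) - (m : Int) < (park.length : Int) ∧
              (0:Int) ≤ (y : Int) ∧ (y : Int) < (L : Int) ∧
              (0:Int) ≤ (y : Int) ∧ (y : Int) < (L : Int)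
          · have hyL : y < L := by have := hb.2.2.2.2.2.1; omega
            have hmx : m ≤ x := by have := hb.2.2.1; omega
            have hxle : x ≤ park.length := by have := hb.2.1; omega
            rw [if_neg (not_or.mpr ⟨hnotneg, not_not.mpr hb⟩)]
            have e1 : ((x : Int) - (m : Int)) = ((x - m : Nat) : Int) := by omega
            rw [e1, pvAt2_col park L y x hyL (by omega),
              pvAt2_col park L y (x - m) hyL (by omega)]
            have hseg := pvSeg_iff (pvColChars park park.length y) (x - m) m
              (by rw [pvColChars_length]; omega)
            rw [show x - m + m = x from by omega] at hseg
            have hok_iff : (pvAllOk (pvOkA park (park.length : Int) (L : Int) (-1) 0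
                (x : Int) (y : Int)) 0 m = true) ↔
                ∀ j : Nat, j < m →
                  (pvColChars park park.length y).getD (x - (j + 1)) ' ' ≠ 'X' := by
              rw [pvAllOk_iff]
              apply forall_congr'
              intro j
              apply imp_congr_right
              intro hj
              unfold pvOkA
              simp only [Bool.and_eq_true, decide_eq_true_eq, mul_zero, add_zero, mul_neg_one,
                ← sub_eq_add_neg, and_assoc]
              have e4 : ((x : Int) - ((0:Int) + 1 + (j : Int))) = ((x - (j + 1) : Nat) : Int) := by
                omega
              rw [e4, pvColChars_getD park park.length y (x - (j + 1)) (by omega),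
                pvCellNotX_iffB park (((x - (j + 1) : Nat) : Nat) : Int) ((y : Nat) : Int)]
              constructor
              · intro hconj
                exact hconj.2.2.2.2
              · intro hcell
                exact ⟨by omega, by omega, by omega, by omega, hcell⟩
            have hiff := hok_iff.trans
              ((pvForall_down (fun t => (pvColChars park park.length y).getD t ' ' ≠ 'X') x m
                hmx).trans hseg.symm)
            exact if_congr hiff rfl rfl
          · rw [if_pos (Or.inr hb)]
            have hfalse : ¬ (pvAllOk (pvOkA park (park.length : Int) (L : Int) (-1) 0
                (x : Int) (y : Int)) 0 m = true) := by
              intro hok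
              have h1 := (pvAllOk_iff _ _ _).1 hok 0 (by omega)
              have h2 := (pvAllOk_iff _ _ _).1 hok (m - 1) (by omega)
              unfold pvOkA at h1 h2
              simp only [Bool.and_eq_true, decide_eq_true_eq, mul_zero, add_zero, mul_neg_one,
                ← sub_eq_add_neg, and_assoc] at h1 h2
              obtain ⟨h1a, h1b, h1c, h1d, -⟩ := h1
              obtain ⟨h2a, h2b, h2c, h2d, -⟩ := h2
              exact hb ⟨by omega, by omega, by omega, by omega, by omega, by omega,
                by omega, by omega⟩
            rw [if_neg hfalse]

-- B keeps coordinates nonnegative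
theorem pvRouteB_nonneg (rows : Nat) (cols : Int) (rowpre colpre : List (List Int)) (x y : Nat)
    (route : String) :
    ∃ x' y' : Nat,
      pvRouteB (rows : Int) cols rowpre colpre ((x : Int), (y : Int)) route =
        ((x' : Int), (y' : Int)) := by
  rcases hsp : PySem.Str.split₀ route with _ | ⟨d, _ | ⟨ns, _ | ⟨e, tl⟩⟩⟩
  · exact ⟨x, y, by simp only [pvRouteB, hsp]⟩
  · exact ⟨x, y, by simp only [pvRouteB, hsp]⟩
  case cons.cons.cons => exact ⟨x, y, by simp only [pvRouteB, hsp]⟩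
  case cons.cons.nil =>
    rcases hdg : pvDirsGet d with _ | ⟨dx, dy⟩
    · exact ⟨x, y, by simp only [pvRouteB, hsp, hdg]⟩
    rcases hn : PySem.Int.ofStr? ns with _ | n
    · exact ⟨x, y, by simp only [pvRouteB, hsp, hdg, hn]⟩
    simp only [pvRouteB, hsp, hdg, hn]
    by_cases h0 : n = 0
    · rw [if_pos h0]
      exact ⟨x, y, rfl⟩
    rw [if_neg h0]
    by_cases hc : n < 0 ∨ ¬(0 ≤ (x : Int) + dx ∧ (x : Int) + dx < (rows : Int) ∧
        0 ≤ (x : Int) + n * dx ∧ (x : Int) + n * dx < (rows : Int) ∧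
        0 ≤ (y : Int) + dy ∧ (y : Int) + dy < cols ∧
        0 ≤ (y : Int) + n * dy ∧ (y : Int) + n * dy < cols)
    · rw [if_pos hc]
      exact ⟨x, y, rfl⟩
    · rw [if_neg hc]
      rw [not_or, not_not] at hc
      have hb := hc.2
      obtain ⟨a, ha⟩ := Int.eq_ofNat_of_zero_le hb.2.2.1
      obtain ⟨b, hbb⟩ := Int.eq_ofNat_of_zero_le hb.2.2.2.2.2.2.1
      have hgoal1 : ∃ x' y' : Nat, (((x : Int) + n * dx, (y : Int) + n * dy) : Int × Int) =
          ((x' : Int), (y' : Int)) := ⟨a, b, by rw [ha, hbb]⟩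
      have hgoal2 : ∃ x' y' : Nat, (((x : Int), (y : Int)) : Int × Int) =
          ((x' : Int), (y' : Int)) := ⟨x, y, rfl⟩
      split_ifs <;> first | exact hgoal1 | exact hgoal2

theorem pvFold_eq (park : List String) (routes : List String) (L : Nat) :
    ∀ (x y : Nat),
      routes.foldl (pvRouteA park (park.length : Int) (L : Int)) ((x : Int), (y : Int)) =
        routes.foldl
          (pvRouteB (park.length : Int) (L : Int)
            ((PySem.List.pyRange 0 (park.length : Int) 1).map
              (fun i => pvPrefixX (pvRowCells park (L : Int) i)))
            ((PySem.List.pyRange 0 (L : Int) 1).map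
              (fun k => pvPrefixX (pvColCells park (park.length : Int) k))))
          ((x : Int), (y : Int)) := by
  induction routes with
  | nil => intro x y; rfl
  | cons r rs ih =>
    intro x y
    simp only [List.foldl_cons]
    rw [pvRoute_eq park r L x y]
    obtain ⟨x', y', heq⟩ := pvRouteB_nonneg park.length (L : Int) _ _ x y r
    rw [heq]
    exact ih x' y'

-- ===== VERDICT (by name: the statement is the Claim_ definition above) =====
theorem solution_spec : Claim_equal_solution := by
  intro park routes hdom hpre
  unfold Spec_solution solution solution_alt
  have hlen : PySem.Str.len (park.headD "") = (((park.headD "").toList.length : Nat) : Int) := by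
    simp [PySem.Str.len_eq]
  obtain ⟨x, y, hstart⟩ := pvFindS_nonneg park 0
  have hfold : routes.foldl (pvRouteA park (park.length : Int) (PySem.Str.len (park.headD "")))
      (pvFindSA park 0) =
      routes.foldl
        (pvRouteB (park.length : Int) (PySem.Str.len (park.headD ""))
          ((PySem.List.pyRange 0 (park.length : Int) 1).map
            (fun i => pvPrefixX (pvRowCells park (PySem.Str.len (park.headD "")) i)))
          ((PySem.List.pyRange 0 (PySem.Str.len (park.headD "")) 1).map
            (fun j => pvPrefixX (pvColCells park (park.length : Int) j))))
        (pvFindSB park 0) := by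
    rw [hlen, ← pvFindS_eq, hstart]
    exact pvFold_eq park routes _ x y
  exact congrArg (fun st : Int × Int => [st.1, st.2]) hfold
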